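-- pv_equiv track=rewrite | github.com/lp247/FPGA-Networking | scripts/CRC32.py | rev_word_bits
-- ===== SOURCE A (Python) =====
-- def rev_word_bits(word: int, wordsize: int = None) -> int:
--     if word.bit_length() == 0:
--         return word
--     size: int = wordsize if wordsize != None else word.bit_length()
--     rev: int = 0
--     for i in range(0, size):
--         rev = (rev << 1) ^ ((word >> i) & 1)
--     return rev
-- ===== SOURCE B (Python) =====
-- def rev_word_bits(word: int, wordsize: int = None) -> int:
--     # B: mask the low `size` bits, render them as a binary string, and re-read
--     # the string with mirrored weights: the digit at string index j (counted
--     # from the most significant end, with size-len(s) leading zeros implied)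
--     # contributes 2**(size-len(s)+j).
--     if word.bit_length() == 0:
--         return word
--     size: int = wordsize if wordsize is not None else word.bit_length()
--     s: str = format(word & ((1 << size) - 1), 'b')
--     return sum(1 << (size - len(s) + j) for j, c in enumerate(s) if c == '1')
-- ===== Notes on version B (the rewrite author's own statement) =====
-- stated objective: alternative
-- what changed: Replaced A's shift-xor bit loop by a representation transform: mask the low size bits, render them as a zero-padded binary string, and sum 1<<i over the string positions holding '1' (position i counted from the most significant end, which mirrors the bits).
-- outside the precondition, e.g. on rev_word_bits(5, -1): A returns 0, B raises ValueError
import Mathlib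
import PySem

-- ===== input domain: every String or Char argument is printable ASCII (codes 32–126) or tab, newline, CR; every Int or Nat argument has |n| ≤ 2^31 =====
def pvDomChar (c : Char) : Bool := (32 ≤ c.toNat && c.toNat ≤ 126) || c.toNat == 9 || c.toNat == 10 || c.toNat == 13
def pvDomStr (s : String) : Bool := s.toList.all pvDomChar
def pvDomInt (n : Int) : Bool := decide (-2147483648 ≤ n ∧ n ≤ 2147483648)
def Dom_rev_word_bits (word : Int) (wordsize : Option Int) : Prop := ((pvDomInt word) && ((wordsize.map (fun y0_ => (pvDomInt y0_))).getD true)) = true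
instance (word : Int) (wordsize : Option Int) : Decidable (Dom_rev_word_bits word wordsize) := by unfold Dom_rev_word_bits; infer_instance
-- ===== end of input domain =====

-- B replaces A's shift-xor bit loop by a representation transform (mask, zero-padded binary
-- string, re-read with mirrored weights): an alternative of the same cost, not claimed faster.

-- ===== PORT A =====
-- every i produced by range(0, size) is ≥ 0, so `word >> i` is exactly `Int.shiftRight word i.toNat`
def rev_word_bits (word : Int) (wordsize : Option Int) : Int :=
  if PySem.Int.bitLength word = 0 then word
  else
    let size : Int := match wordsize with
      | some w => w
      | none => (PySem.Int.bitLength word : Int)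
    (PySem.List.pyRange 0 size 1).foldl
      (fun rev i => Int.xor (rev <<< (1 : Nat)) (PySem.Int.band (Int.shiftRight word i.toNat) 1)) 0

-- ===== PORT B =====
def rev_word_bits_alt (word : Int) (wordsize : Option Int) : Int :=
  if PySem.Int.bitLength word = 0 then word
  else
    let size : Int := match wordsize with
      | some w => w
      | none => (PySem.Int.bitLength word : Int)
    -- `1 << size`: Pre_ gives 0 ≤ size, so this is `1 <<< size.toNat`
    let m : Int := PySem.Int.band word ((1 <<< size.toNat) - 1)
    -- format(m, 'b')
    let s : List Char := PySem.Int.toBinChars m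
    -- sum(1 << (size - len(s) + j) for j, c in enumerate(s) if c == '1');
    -- whenever c == '1', size - len(s) + j is ≥ 0, so the shift is <<< on .toNat
    (PySem.List.enumerate s).foldl
      (fun acc jc => if jc.2 = '1' then acc + ((1 : Int) <<< (size - (s.length : Int) + jc.1).toNat) else acc) 0

-- ===== PRECONDITION & SPEC =====
-- Pre_ excludes a negative wordsize: there A's range(0, size) is empty so A returns 0,
-- while B's own `1 << size` raises ValueError.
def Pre_rev_word_bits (word : Int) (wordsize : Option Int) : Prop := 0 ≤ wordsize.getD 0
instance (word : Int) (wordsize : Option Int) : Decidable (Pre_rev_word_bits word wordsize) := by unfold Pre_rev_word_bits; infer_instance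
def pvWitness_rev_word_bits : Int × Option Int := (5, some 3)

def Spec_rev_word_bits (word : Int) (wordsize : Option Int) (out : Int) : Prop := out = rev_word_bits_alt word wordsize
instance (word : Int) (wordsize : Option Int) (out : Int) : Decidable (Spec_rev_word_bits word wordsize out) := by unfold Spec_rev_word_bits; infer_instance

-- ===== CLAIM (what is proved, stated in full; the proofs are below) =====
def Claim_equal_rev_word_bits : Prop := ∀ (word : Int) (wordsize : Option Int), Dom_rev_word_bits word wordsize → Pre_rev_word_bits word wordsize → Spec_rev_word_bits word wordsize (rev_word_bits word wordsize)

-- ===== LEMMAS AND PROOFS =====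

-- bit i of word, and the mathematical bit-reversal A computes
def pvBit (w : Int) (n : Nat) : Int := PySem.Int.band (Int.shiftRight w n) 1

def pvRef (w : Int) : Nat → Int
  | 0 => 0
  | n + 1 => 2 * pvRef w n + pvBit w n

lemma pv_band_one01 (x : Int) : PySem.Int.band x 1 = 0 ∨ PySem.Int.band x 1 = 1 := by
  rw [PySem.Int.band_one]
  have h1 := PySem.Int.mod_nonneg (a := x) (b := 2) (by norm_num)
  have h2 := PySem.Int.mod_lt (a := x) (b := 2) (by norm_num)
  omega

lemma pv_ref_bounds (w : Int) (n : Nat) : 0 ≤ pvRef w n ∧ pvRef w n < 2 ^ n := by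
  induction n with
  | zero => simp [pvRef]
  | succ n ih =>
    have hb := pv_band_one01 (Int.shiftRight w n)
    have : pvRef w (n + 1) = 2 * pvRef w n + pvBit w n := rfl
    rw [this]
    unfold pvBit
    rw [pow_succ]
    omega

lemma pv_xor_two_mul_one (m : Nat) : (2 * m) ^^^ 1 = 2 * m + 1 := by
  apply Nat.eq_of_testBit_eq
  intro i
  cases i with
  | zero =>
    rw [Nat.testBit_zero, Nat.testBit_zero, Nat.xor_mod_two_eq]
  | succ j =>
    rw [Nat.testBit_add_one, Nat.testBit_add_one, Nat.xor_div_two]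
    have h1 : (2 * m) / 2 = m := by omega
    have h2 : (1 : Nat) / 2 = 0 := by omega
    have h3 : (2 * m + 1) / 2 = m := by omega
    rw [h1, h2, h3, Nat.xor_zero]

lemma pv_xor_zero (x : Int) : Int.xor x 0 = x := by
  cases x <;> simp [Int.xor]

lemma pv_xor_natCast (a b : Nat) : Int.xor (a : Int) (b : Int) = ((a ^^^ b : Nat) : Int) := rfl

lemma pv_xor_step (r b : Int) (hr : 0 ≤ r) (hb : b = 0 ∨ b = 1) :
    Int.xor (r <<< (1 : Nat)) b = 2 * r + b := by
  rcases hb with rfl | rfl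
  · rw [pv_xor_zero, Int.shiftLeft_eq]; ring
  · obtain ⟨m, rfl⟩ : ∃ m : Nat, r = (m : Int) := ⟨r.toNat, (Int.toNat_of_nonneg hr).symm⟩
    have h1 : (m : Int) <<< (1 : Nat) = ((2 * m : Nat) : Int) := by
      rw [Int.shiftLeft_eq]; push_cast; ring
    have h2 : (1 : Int) = ((1 : Nat) : Int) := rfl
    rw [h1, h2, pv_xor_natCast, pv_xor_two_mul_one]
    push_cast; ring

lemma pv_sr_zero (w : Int) : Int.shiftRight w 0 = w := Int.shiftRight_zero w

lemma pv_bit_shift (w : Int) (n : Nat) : pvBit (Int.shiftRight w 1) n = pvBit w (n + 1) := by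
  unfold pvBit
  congr 1
  have h : w >>> (1 + n) = (w >>> (1 : Nat)) >>> n := Int.shiftRight_add w 1 n
  rw [Nat.add_comm 1 n] at h
  exact h.symm

lemma pv_ref_unfold (w : Int) (n : Nat) :
    pvRef w (n + 1) = PySem.Int.band w 1 * 2 ^ n + pvRef (Int.shiftRight w 1) n := by
  induction n generalizing w with
  | zero =>
    show 2 * pvRef w 0 + pvBit w 0 = _
    unfold pvBit
    rw [pv_sr_zero]
    simp [pvRef]
  | succ n ih =>
    have h1 : pvRef w (n + 2) = 2 * pvRef w (n + 1) + pvBit w (n + 1) := rfl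
    have h2 : pvRef (Int.shiftRight w 1) (n + 1)
        = 2 * pvRef (Int.shiftRight w 1) n + pvBit (Int.shiftRight w 1) n := rfl
    rw [h1, ih, h2, pv_bit_shift, pow_succ]
    ring

lemma pv_fold_eq_ref (w : Int) (n : Nat) :
    (List.range n).foldl
      (fun (rev : Int) (k : Nat) => Int.xor (rev <<< (1 : Nat))
        (PySem.Int.band (Int.shiftRight w ((0 : Int) + (k : Int)).toNat) 1)) 0 = pvRef w n := by
  induction n with
  | zero => rfl
  | succ n ih =>
    rw [List.range_succ, List.foldl_append, ih]
    simp only [List.foldl_cons, List.foldl_nil]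
    have ht : ((0 : Int) + (n : Int)).toNat = n := by omega
    rw [ht, pv_xor_step (pvRef w n) _ (pv_ref_bounds w n).1 (pv_band_one01 _)]
    rfl

-- ===== B-side machinery =====

-- the value A computes, as a recursion over the masked NAT value: pvN m (k+1) = bit0·2^k + pvN (m/2) k
def pvN : Nat → Nat → Int
  | _, 0 => 0
  | m, k + 1 => ((m % 2 : Nat) : Int) * 2 ^ k + pvN (m / 2) k

-- msb-first binary digits of a Nat (the list format(m,'b') produces)
def pvDigs (m : Nat) : List Char :=
  if m < 2 then [Nat.digitChar m]
  else pvDigs (m / 2) ++ [Nat.digitChar (m % 2)]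
decreasing_by omega

lemma pv_digs_len_le (m k : Nat) (h1 : 1 ≤ k) (h2 : m < 2 ^ k) : (pvDigs m).length ≤ k := by
  induction m using Nat.strong_induction_on generalizing k with
  | _ m ih =>
    rw [pvDigs]
    by_cases hm : m < 2
    · simp [hm]; omega
    · rw [if_neg hm]
      have hk2 : 2 ≤ k := by
        by_contra hc
        interval_cases k <;> omega
      have := ih (m / 2) (by omega) (k - 1) (by omega) (by
        have : 2 ^ k = 2 * 2 ^ (k - 1) := by
          rw [← pow_succ']
          congr 1
          omega
        omega)
      simp
      omega

lemma pv_tdc_acc (f : Nat) : ∀ (n : Nat) (ds : List Char),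
    Nat.toDigitsCore 2 f n ds = Nat.toDigitsCore 2 f n [] ++ ds := by
  induction f with
  | zero => intro n ds; simp [Nat.toDigitsCore]
  | succ f ih =>
    intro n ds
    simp only [Nat.toDigitsCore]
    by_cases h : n / 2 = 0
    · simp [h]
    · rw [if_neg h, if_neg h, ih (n / 2) ((n % 2).digitChar :: ds), ih (n / 2) [(n % 2).digitChar]]
      simp

lemma pv_tdc_eq (f : Nat) : ∀ m : Nat, m < f → Nat.toDigitsCore 2 f m [] = pvDigs m := by
  induction f with
  | zero => intro m h; omega
  | succ f ih =>
    intro m h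
    rw [pvDigs]
    simp only [Nat.toDigitsCore]
    by_cases hm : m < 2
    · have h2 : m / 2 = 0 := by omega
      rw [if_pos h2, if_pos hm]
      have : m % 2 = m := by omega
      rw [this]
    · have h2 : ¬ m / 2 = 0 := by omega
      rw [if_neg h2, if_neg hm, pv_tdc_acc, ih (m / 2) (by omega)]

lemma pv_toBin (m : Nat) : PySem.Int.toBinChars (m : Int) = pvDigs m := by
  rw [PySem.Int.toBinChars]
  rw [if_neg (by omega)]
  simp only [Int.toNat_natCast]
  exact pv_tdc_eq (m + 1) m (by omega)

lemma pv_one_shl (n : Nat) : ((1 : Int) <<< n) = 2 ^ n := by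
  rw [Int.shiftLeft_eq, one_mul]

-- the value of B's generator sum over enumerate(s), with offset c = size - len(s)
def pvV (d : List Char) (c : Int) : Int :=
  ((PySem.List.enumerate d).map
    (fun jc => if jc.2 = '1' then ((1 : Int) <<< ((c + jc.1).toNat : Nat)) else 0)).sum

lemma pv_fold_enum (d : List Char) (c : Int) :
    (PySem.List.enumerate d).foldl
      (fun acc jc => if jc.2 = '1' then acc + ((1 : Int) <<< (c + jc.1).toNat) else acc) 0 = pvV d c := by
  have h : (fun (acc : Int) (jc : Int × Char) => if jc.2 = '1' then acc + ((1 : Int) <<< ((c + jc.1).toNat : Nat)) else acc)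
      = (fun acc jc => acc + (if jc.2 = '1' then ((1 : Int) <<< ((c + jc.1).toNat : Nat)) else 0)) := by
    funext acc jc
    split
    · rfl
    · exact (add_zero acc).symm
  rw [h, PySem.List.foldl_add, pvV, zero_add]

lemma pv_v_append (d : List Char) (ch : Char) (c : Int) :
    pvV (d ++ [ch]) c = pvV d c + (if ch = '1' then ((2 : Int) ^ (c + (d.length : Int)).toNat) else 0) := by
  unfold pvV
  rw [PySem.List.enumerate_append]
  simp only [List.map_append, List.sum_append]
  congr 1
  simp only [PySem.List.enumerate_cons, PySem.List.enumerate_nil, List.map_cons, List.map_nil,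
    List.sum_cons, List.sum_nil, add_zero, zero_add]
  by_cases hc : ch = '1'
  · rw [if_pos hc, if_pos hc, pv_one_shl]
  · rw [if_neg hc, if_neg hc]

lemma pvN_zero (k : Nat) : pvN 0 k = 0 := by
  induction k with
  | zero => rfl
  | succ k ih =>
    show ((0 % 2 : Nat) : Int) * 2 ^ k + pvN (0 / 2) k = 0
    simpa using ih

lemma pv_v_digs (k : Nat) : ∀ m : Nat, 1 ≤ k → m < 2 ^ k →
    pvV (pvDigs m) ((k : Int) - ((pvDigs m).length : Int)) = pvN m k := by
  induction k with
  | zero => intro m h; omega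
  | succ k ih =>
    intro m _ hm
    by_cases hm2 : m < 2
    · have hd : pvDigs m = [Nat.digitChar m] := by rw [pvDigs, if_pos hm2]
      rw [hd]
      have hN : pvN m (k + 1) = ((m % 2 : Nat) : Int) * 2 ^ k + pvN (m / 2) k := rfl
      have hm0 : m / 2 = 0 := by omega
      have hmm : m % 2 = m := by omega
      rw [hN, hm0, hmm, pvN_zero]
      unfold pvV
      simp only [PySem.List.enumerate_cons, PySem.List.enumerate_nil, List.map_cons, List.map_nil,
        List.sum_cons, List.sum_nil, add_zero, List.length_singleton]
      have hoff : (((k + 1 : Nat) : Int) - ((1 : Nat) : Int)).toNat = k := by push_cast; omega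
      rw [hoff]
      interval_cases m
      · rw [if_neg (by decide)]
        push_cast
        ring
      · rw [if_pos (by decide), pv_one_shl]
        push_cast
        ring
    · have hd : pvDigs m = pvDigs (m / 2) ++ [Nat.digitChar (m % 2)] := by
        rw [pvDigs, if_neg hm2]
      have hk1 : 1 ≤ k := by
        by_contra hc
        have : k = 0 := by omega
        rw [this] at hm
        omega
      have hm2' : m / 2 < 2 ^ k := by
        have : 2 ^ (k + 1) = 2 * 2 ^ k := by rw [pow_succ]; ring
        omega
      have hlen : (pvDigs (m / 2)).length ≤ k := pv_digs_len_le (m / 2) k hk1 hm2'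
      rw [hd, pv_v_append]
      have hoff : ((k + 1 : Nat) : Int) - (((pvDigs (m / 2) ++ [Nat.digitChar (m % 2)]).length : Nat) : Int)
          = ((k : Nat) : Int) - (((pvDigs (m / 2)).length : Nat) : Int) := by
        simp only [List.length_append, List.length_singleton]
        push_cast
        ring
      rw [hoff, ih (m / 2) hk1 hm2']
      have hexp : (((k : Nat) : Int) - (((pvDigs (m / 2)).length : Nat) : Int) + (((pvDigs (m / 2)).length : Nat) : Int)).toNat = k := by
        omega
      rw [hexp]
      have hN : pvN m (k + 1) = ((m % 2 : Nat) : Int) * 2 ^ k + pvN (m / 2) k := rfl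
      rw [hN]
      have h01 : m % 2 = 0 ∨ m % 2 = 1 := by omega
      rcases h01 with h0 | h1
      · rw [h0, if_neg (by decide)]
        push_cast
        ring
      · rw [h1, if_pos (by decide)]
        push_cast
        ring

-- the masked value is Python's word % 2^k (for every sign of word)
lemma pv_band_mask (w : Int) (k : Nat) :
    PySem.Int.band w (((1 <<< k : Nat) : Int) - 1) = w % 2 ^ k := by
  rw [Nat.one_shiftLeft]
  have hN : 1 ≤ 2 ^ k := Nat.one_le_two_pow
  have hcast : (((2 ^ k : Nat) : Int)) = (2 : Int) ^ k := by push_cast; rfl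
  have hp : (0 : Int) < 2 ^ k := by positivity
  by_cases hw : 0 ≤ w
  · rw [PySem.Int.band_of_nonneg hw (by omega)]
    have ht : (((2 ^ k : Nat) : Int) - 1).toNat = 2 ^ k - 1 := by omega
    rw [ht, Nat.and_two_pow_sub_one_eq_mod]
    conv_rhs => rw [← Int.toNat_of_nonneg hw]
    rw [← hcast]
    push_cast
    rfl
  · have hmask : ¬ ((((2 ^ k : Nat) : Int)) - 1 < 0) := by omega
    simp only [PySem.Int.band]
    rw [if_neg (by omega), if_pos (by omega)]
    have hyc : ((((-w - 1).toNat : Nat) : Int)) = -w - 1 := Int.toNat_of_nonneg (by omega)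
    set y : Nat := (-w - 1).toNat with hy
    have htm : ((((2 ^ k : Nat) : Int)) - 1).toNat = 2 ^ k - 1 := by omega
    rw [htm, Nat.and_comm, Nat.and_two_pow_sub_one_eq_mod]
    have hb : y % 2 ^ k < 2 ^ k := Nat.mod_lt _ (by omega)
    have hdm := Nat.div_add_mod y (2 ^ k)
    have hdmi : ((2 ^ k : Nat) : Int) * ((y / 2 ^ k : Nat) : Int) + ((y % 2 ^ k : Nat) : Int) = (y : Int) := by
      exact_mod_cast congrArg (fun t : Nat => (t : Int)) hdm
    have hwdec : w = ((2 ^ k - 1 - y % 2 ^ k : Nat) : Int)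
        + (2 : Int) ^ k * (-(((y / 2 ^ k : Nat) : Int)) - 1) := by
      have hc2 : ((2 ^ k - 1 - y % 2 ^ k : Nat) : Int)
          = ((2 ^ k : Nat) : Int) - 1 - ((y % 2 ^ k : Nat) : Int) := by omega
      rw [hc2, ← hcast]
      have hweq : w = -1 - (y : Int) := by omega
      linear_combination hweq + hdmi
    conv_rhs => rw [hwdec]
    rw [Int.add_mul_emod_self_left, Int.emod_eq_of_lt (by omega) (by omega)]

-- A's reversal reads only word mod 2^k, and equals pvN of it
lemma pv_ref_eq_pvN (w : Int) (k : Nat) : pvRef w k = pvN (w % 2 ^ k).toNat k := by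
  induction k generalizing w with
  | zero => simp [pvRef, pvN]
  | succ k ih =>
    have hp : (0 : Int) < 2 ^ (k + 1) := by positivity
    have hp' : (0 : Int) < 2 ^ k := by positivity
    have hr0 : 0 ≤ w % 2 ^ (k + 1) := Int.emod_nonneg w (by omega)
    set r : Int := w % 2 ^ (k + 1) with hrdef
    set m : Nat := r.toNat with hmdef
    have hrm : (m : Int) = r := Int.toNat_of_nonneg hr0
    rw [pv_ref_unfold, ih (Int.shiftRight w 1)]
    have hNeq : pvN m (k + 1) = ((m % 2 : Nat) : Int) * 2 ^ k + pvN (m / 2) k := rfl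
    rw [hNeq]
    -- low bit
    have hbit : PySem.Int.band w 1 = ((m % 2 : Nat) : Int) := by
      rw [PySem.Int.band_one, PySem.Int.mod_eq_emod_of_pos (by omega)]
      have h2 : (2 : Int) ∣ 2 ^ (k + 1) := dvd_pow_self 2 (Nat.succ_ne_zero k)
      have := Int.emod_emod_of_dvd w h2
      rw [← hrdef] at this
      rw [← this, ← hrm]
      push_cast
      rfl
    -- shifted remainder
    have hq := Int.ediv_add_emod w (2 ^ (k + 1))
    have hshift : Int.shiftRight w 1 % 2 ^ k = ((m / 2 : Nat) : Int) := by
      have hsr : Int.shiftRight w 1 = w / 2 := by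
        have := Int.shiftRight_eq_div_pow w 1
        simpa using this
      have hwr : w = r + 2 * (2 ^ k * (w / 2 ^ (k + 1))) := by
        have h21 : (2 : Int) ^ (k + 1) = 2 * 2 ^ k := by rw [pow_succ]; ring
        linear_combination hq.symm + (w / 2 ^ (k + 1)) * h21
      have hdiv : w / 2 = r / 2 + 2 ^ k * (w / 2 ^ (k + 1)) := by
        conv_lhs => rw [hwr]
        rw [Int.add_mul_ediv_left _ _ (by omega)]
      have hrlt : r < 2 ^ (k + 1) := Int.emod_lt_of_pos w hp
      have hr2 : r / 2 < 2 ^ k := by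
        have h21 : (2 : Int) ^ (k + 1) = 2 * 2 ^ k := by rw [pow_succ]; ring
        omega
      rw [hsr, hdiv, Int.add_mul_emod_self_left,
        Int.emod_eq_of_lt (by omega) hr2, ← hrm]
      omega
    rw [hbit, hshift]
    congr 1

-- the two loop bodies agree for every word and every nonnegative size
lemma pv_main (word s : Int) (hs : 0 ≤ s) :
    (PySem.List.pyRange 0 s 1).foldl
      (fun rev i => Int.xor (rev <<< (1 : Nat)) (PySem.Int.band (Int.shiftRight word i.toNat) 1)) 0
    = (PySem.List.enumerate (PySem.Int.toBinChars (PySem.Int.band word ((1 <<< s.toNat) - 1)))).foldl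
      (fun acc jc => if jc.2 = '1' then acc
        + ((1 : Int) <<< (s - ((PySem.Int.toBinChars (PySem.Int.band word ((1 <<< s.toNat) - 1))).length : Int) + jc.1).toNat)
        else acc) 0 := by
  set k : Nat := s.toNat with hk
  have hp : (0 : Int) < 2 ^ k := by positivity
  rw [PySem.List.pyRange_one, List.foldl_map, pv_fold_eq_ref, pv_fold_enum, pv_band_mask word k]
  have hMnn : 0 ≤ word % 2 ^ k := Int.emod_nonneg word (by omega)
  set m : Nat := (word % 2 ^ k).toNat with hm
  have hrm : word % 2 ^ k = (m : Int) := (Int.toNat_of_nonneg hMnn).symm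
  rw [hrm, pv_toBin m]
  have hsz : (s - 0).toNat = k := by omega
  rw [hsz, pv_ref_eq_pvN, hrm, Int.toNat_natCast]
  by_cases hk0 : k = 0
  · have h1 : (2 : Int) ^ k = 1 := by rw [hk0]; rfl
    have h2 : word % (2 : Int) ^ k = 0 := by rw [h1]; exact Int.emod_one word
    have hm0 : m = 0 := by omega
    have hd0 : pvDigs 0 = ['0'] := by rw [pvDigs]; rfl
    rw [hm0, hd0]
    unfold pvV
    simp [PySem.List.enumerate_cons, PySem.List.enumerate_nil]
    exact pvN_zero k
  · have hmlt : m < 2 ^ k := by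
      have h1 : word % 2 ^ k < 2 ^ k := Int.emod_lt_of_pos word hp
      have h2 : ((2 ^ k : Nat) : Int) = (2 : Int) ^ k := by push_cast; rfl
      omega
    have hsk : s = ((k : Nat) : Int) := by omega
    rw [hsk]
    exact (pv_v_digs k m (by omega) hmlt).symm

-- ===== VERDICT (by name: the statement is the Claim_ definition above) =====
theorem rev_word_bits_spec : Claim_equal_rev_word_bits := by
  intro word wordsize _ hpre
  unfold Spec_rev_word_bits
  by_cases h : PySem.Int.bitLength word = 0
  · simp only [rev_word_bits, rev_word_bits_alt, if_pos h]
  · simp only [rev_word_bits, rev_word_bits_alt, if_neg h]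
    cases wordsize with
    | none => exact pv_main word _ (by positivity)
    | some w =>
      exact pv_main word w (by simpa [Pre_rev_word_bits] using hpre)
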